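-- pv_equiv track=rewrite | github.com/bjourne/musicgen | musicgen/mycode.py | guess_initial_sample
-- ===== SOURCE A (Python) =====
-- INSN_SAMPLE = 'S'
--
-- def guess_initial_sample(seq):
--     at_sample = 0
--     min_sample = 0
--     max_sample = 0
--     for cmd, arg in seq:
--         if cmd == INSN_SAMPLE:
--             at_sample += arg
--             max_sample = max(at_sample, max_sample)
--             min_sample = min(at_sample, min_sample)
--     return -min_sample + 1
-- ===== SOURCE B (Python) =====
-- INSN_SAMPLE = 'S'
--
-- def guess_initial_sample(seq):
--     # Backward scan: m is min(0, lowest prefix-sum of the S-deltas of the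
--     # part already seen); no running total is ever maintained.
--     m = 0
--     for cmd, arg in reversed(seq):
--         if cmd == INSN_SAMPLE:
--             m = min(0, arg + m)
--     return 1 - m
-- ===== Notes on version B (the rewrite author's own statement) =====
-- stated objective: alternative
-- what changed: Replaces the forward loop that maintains a running total with its min and max by a right-to-left scan maintaining a single value m via the recurrence m = min(0, arg + m); no running total or prefix sums are computed, correctness rests on the identity minprefix(x::xs) = min(0, x + minprefix(xs)).
import Mathlib
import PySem

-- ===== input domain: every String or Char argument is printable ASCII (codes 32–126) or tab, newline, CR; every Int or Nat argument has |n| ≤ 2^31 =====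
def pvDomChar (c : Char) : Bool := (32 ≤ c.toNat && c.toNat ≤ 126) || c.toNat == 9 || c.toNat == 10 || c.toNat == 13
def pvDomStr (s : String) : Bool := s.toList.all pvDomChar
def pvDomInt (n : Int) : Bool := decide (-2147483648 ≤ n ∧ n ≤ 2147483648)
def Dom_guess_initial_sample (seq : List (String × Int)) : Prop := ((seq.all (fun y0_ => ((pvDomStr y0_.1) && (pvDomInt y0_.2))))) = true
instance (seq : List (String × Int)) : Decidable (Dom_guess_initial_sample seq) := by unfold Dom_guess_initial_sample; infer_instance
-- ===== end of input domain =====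

-- B replaces the forward running-total/min/max loop by a right-to-left scan with the recurrence m = min(0, arg + m) (alternative decomposition; same cost).


-- ===== PORT A =====
-- literal fold over (at_sample, max_sample, min_sample); the loop body is pvStepA
def pvStepA (s : Int × Int × Int) (p : String × Int) : Int × Int × Int :=
  let (at_sample, max_sample, min_sample) := s
  if p.1 = "S" then
    let at' := at_sample + p.2
    (at', max at' max_sample, min at' min_sample)
  else s

def guess_initial_sample (seq : List (String × Int)) : Int :=
  let st := seq.foldl pvStepA (0, 0, 0)
  (-st.2.2) + 1

-- ===== PORT B =====
-- right-to-left loop over reversed(seq): m = min(0, arg + m) on 'S' commands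
def pvStepB (p : String × Int) (m : Int) : Int :=
  if p.1 = "S" then min 0 (p.2 + m) else m

def guess_initial_sample_alt (seq : List (String × Int)) : Int :=
  1 - seq.reverse.foldl (fun m p => pvStepB p m) 0

-- ===== PRECONDITION & SPEC =====
def Spec_guess_initial_sample (seq : List (String × Int)) (out : Int) : Prop := out = guess_initial_sample_alt seq
instance (seq : List (String × Int)) (out : Int) : Decidable (Spec_guess_initial_sample seq out) := by unfold Spec_guess_initial_sample; infer_instance

-- ===== CLAIM (what is proved, stated in full; the proofs are below) =====
def Claim_equal_guess_initial_sample : Prop := ∀ (seq : List (String × Int)), Dom_guess_initial_sample seq → Spec_guess_initial_sample seq (guess_initial_sample seq)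

-- ===== LEMMAS AND PROOFS =====
lemma foldr_stepB_nonpos (seq : List (String × Int)) : seq.foldr pvStepB 0 ≤ 0 := by
  induction seq with
  | nil => simp
  | cons h t ih =>
    by_cases hs : h.1 = "S" <;> simp [pvStepB, hs, ih]

lemma min_component_eq (seq : List (String × Int)) (a mx mn : Int) (h : mn ≤ a) :
    (seq.foldl pvStepA (a, mx, mn)).2.2 = min mn (a + seq.foldr pvStepB 0) := by
  induction seq generalizing a mx mn with
  | nil => simpa using le_antisymm (min_le_left _ _) (le_min le_rfl h)
  | cons hd t ih =>
    rw [List.foldl_cons, List.foldr_cons]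
    by_cases hs : hd.1 = "S"
    · simp only [pvStepA, hs, if_pos]
      rw [ih _ _ _ (min_le_left _ _)]
      have ht := foldr_stepB_nonpos t
      simp only [pvStepB, hs, if_pos]
      omega
    · simp only [pvStepA, pvStepB, hs, ite_false]
      exact ih _ _ _ h

-- ===== VERDICT (by name: the statement is the Claim_ definition above) =====
theorem guess_initial_sample_spec : Claim_equal_guess_initial_sample := by
  intro seq _
  unfold Spec_guess_initial_sample guess_initial_sample guess_initial_sample_alt
  rw [List.foldl_reverse]
  simp only []
  rw [show (fun x y => pvStepB x y) = pvStepB from rfl, min_component_eq seq 0 0 0 le_rfl]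
  have := foldr_stepB_nonpos seq
  omega
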